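-- pv_equiv track=rewrite | github.com/csabyy/adventofcode | 2023/13/task.py | replacement_candidates
-- ===== SOURCE A (Python) =====
-- def replacement_candidates(pattern):
--     replacement_candidate_list = {}
--     for current_pattern_index, current_pattern in enumerate(pattern):
--         counter = current_pattern_index + 1
--         while counter < len(pattern):
--             other_line = pattern[counter]
--             diff_counter = 0
--             for line_char_index, line_char in enumerate(current_pattern):
--                 if line_char != other_line[line_char_index]:
--                     diff_counter += 1
--                 if diff_counter > 1:
--                     break
--             if diff_counter == 1:
--                 if replacement_candidate_list.get(current_pattern_index):
--                     replacement_candidate_list[current_pattern_index].add(other_line)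
--                 else:
--                     replacement_candidate_list[current_pattern_index] = {other_line}
--                 if replacement_candidate_list.get(counter):
--                     replacement_candidate_list[counter].add(current_pattern)
--                 else:
--                     replacement_candidate_list[counter] = { current_pattern}
--             counter += 1
--     return replacement_candidate_list
-- ===== SOURCE B (Python) =====
-- def replacement_candidates(pattern):
--     # Bucket rows by (column, row with that column removed): two rows share a
--     # bucket key exactly when they agree everywhere outside that column, so two
--     # unequal rows in a common bucket are at Hamming distance exactly 1.
--     buckets = {}
--     for i, row in enumerate(pattern):
--         for p in range(len(row)):
--             buckets.setdefault((p, row[:p] + row[p + 1:]), []).append(i)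
--     pairs = []
--     for bucket in buckets.values():
--         for x, i in enumerate(bucket):
--             for j in bucket[x + 1:]:
--                 if pattern[i] != pattern[j]:
--                     pairs.append((i, j))
--     result = {}
--     for i, j in sorted(pairs):
--         result.setdefault(i, set()).add(pattern[j])
--         result.setdefault(j, set()).add(pattern[i])
--     return result
-- ===== Notes on version B (the rewrite author's own statement) =====
-- stated objective: faster
-- what changed: Replaces A's O(n^2) pairwise row comparison with bucketing: rows are grouped by (column, row-with-that-column-removed) keys, so exactly the distance-1 pairs fall into a common bucket; the collected pairs are sorted and folded into the result dict.
-- outside the precondition, e.g. on replacement_candidates(['ab', 'cbx']): A returns {0: {'cbx'}, 1: {'ab'}}, B returns {}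
import Mathlib
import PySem

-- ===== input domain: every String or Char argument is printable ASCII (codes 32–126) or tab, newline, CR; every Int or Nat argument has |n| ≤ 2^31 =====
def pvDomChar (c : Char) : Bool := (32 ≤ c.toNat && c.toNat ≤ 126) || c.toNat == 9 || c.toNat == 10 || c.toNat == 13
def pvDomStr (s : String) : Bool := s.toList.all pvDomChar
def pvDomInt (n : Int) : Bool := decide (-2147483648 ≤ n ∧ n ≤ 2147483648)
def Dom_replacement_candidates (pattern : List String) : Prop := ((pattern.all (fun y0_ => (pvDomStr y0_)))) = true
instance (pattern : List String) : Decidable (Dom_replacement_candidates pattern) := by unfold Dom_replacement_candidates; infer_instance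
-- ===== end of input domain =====

-- B replaces A's all-pairs scan with column-masked bucketing (rows sharing a
-- (column, row-minus-column) key are at Hamming distance 1); same return value.


-- ===== PORT A =====
-- truthiness of `replacement_candidate_list.get(k)` (None is falsy, a set is truthy iff nonempty)
def pvTruthy : Option (PySem.Set String) → Bool
  | none => false
  | some s => !s.isEmpty

-- `if d.get(k): d[k].add(v)  else: d[k] = {v}`
def pvAddCand (d : PySem.Dict Int (PySem.Set String)) (k : Int) (v : String) :
    PySem.Dict Int (PySem.Set String) :=
  if pvTruthy (d.get? k) then d.insert k (PySem.Set.add (d.getD k PySem.Set.empty) v)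
  else d.insert k (PySem.Set.ofList [v])

-- `for line_char_index, line_char in enumerate(current_pattern): …` with the `break`;
-- an out-of-range index (Python IndexError, excluded by Pre_) counts as a mismatch here
def pvDiffLoop (other : String) : List (Int × Char) → Int → Int
  | [], diff => diff
  | (idx, c) :: rest, diff =>
    let diff' := if some c ≠ PySem.Str.pyGet? other idx then diff + 1 else diff
    if diff' > 1 then diff' else pvDiffLoop other rest diff'

-- `while counter < len(pattern): …`
def pvWhileA (pattern : List String) (i : Int) (cur : String)
    (counter : Int) (d : PySem.Dict Int (PySem.Set String)) :
    PySem.Dict Int (PySem.Set String) :=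
  if h : counter < PySem.List.len pattern then
    let other := PySem.List.pyGetD pattern counter ""
    let diff := pvDiffLoop other (PySem.List.enumerate cur.toList) 0
    let d' := if diff == 1 then pvAddCand (pvAddCand d i other) counter cur else d
    pvWhileA pattern i cur (counter + 1) d'
  else d
termination_by (PySem.List.len pattern - counter).toNat
decreasing_by simp only [PySem.List.len_eq] at h ⊢; omega

def replacement_candidates (pattern : List String) : List (Int × List String) :=
  ((PySem.List.enumerate pattern).foldl
    (fun d p => pvWhileA pattern p.1 p.2 (p.1 + 1) d)
    PySem.Dict.empty).items

-- ===== PORT B =====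
-- `row[:p] + row[p+1:]` (string slicing, on the code-point list)
def pvMask (row : List Char) (p : Int) : List Char :=
  PySem.List.slice row none (some p) ++ PySem.List.slice row (some (p + 1)) none

-- `buckets.setdefault((p, row[:p] + row[p+1:]), []).append(i)`
def pvBuckets (pattern : List String) : PySem.Dict (Int × List Char) (List Int) :=
  (PySem.List.enumerate pattern).foldl
    (fun d pr =>
      (PySem.List.pyRange 0 (PySem.Str.len pr.2) 1).foldl
        (fun d p => d.modify (p, pvMask pr.2.toList p) [] (· ++ [pr.1])) d)
    PySem.Dict.empty

-- `for x, i in enumerate(bucket): for j in bucket[x+1:]: if pattern[i] != pattern[j]: pairs.append((i, j))`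
def pvBucketPairs (pattern : List String) (g : List Int) (acc : List (Int × Int)) :
    List (Int × Int) :=
  (PySem.List.enumerate g).foldl
    (fun acc q =>
      (PySem.List.slice g (some (q.1 + 1)) none).foldl
        (fun acc j =>
          if PySem.List.pyGetD pattern q.2 "" ≠ PySem.List.pyGetD pattern j "" then
            acc ++ [(q.2, j)]
          else acc) acc) acc

def pvAllPairs (pattern : List String) : List (Int × Int) :=
  (pvBuckets pattern).values.foldl (fun acc g => pvBucketPairs pattern g acc) []

-- `result.setdefault(i, set()).add(pattern[j]); result.setdefault(j, set()).add(pattern[i])`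
def pvStepB (pattern : List String) (d : PySem.Dict Int (PySem.Set String)) (pr : Int × Int) :
    PySem.Dict Int (PySem.Set String) :=
  ((d.modify pr.1 PySem.Set.empty (fun s => PySem.Set.add s (PySem.List.pyGetD pattern pr.2 ""))).modify
    pr.2 PySem.Set.empty (fun s => PySem.Set.add s (PySem.List.pyGetD pattern pr.1 "")))

-- `sorted(pairs)` sorts int pairs lexicographically (Python tuple order)
def replacement_candidates_alt (pattern : List String) : List (Int × List String) :=
  ((PySem.List.sorted (pvAllPairs pattern) (fun pr => (toLex pr : Lex (Int × Int)))).foldl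
    (pvStepB pattern) PySem.Dict.empty).items

-- ===== PRECONDITION & SPEC =====
-- Pre_ excludes ragged patterns in which some pair of rows of different lengths differs at
-- most once within their overlap: there A raises IndexError (when the later row is the shorter
-- one) or returns candidates computed from a prefix-only comparison, an accident of indexing
-- by the earlier row's length; B's natural value pairs only equal-length rows.
def Pre_replacement_candidates (pattern : List String) : Prop :=
  pattern.Pairwise (fun s t =>
    s.toList.length = t.toList.length ∨
    (if t.toList.length < s.toList.length
     then 2 ≤ (s.toList.zip t.toList).countP (fun q => q.1 != q.2)
     else (s.toList.zip t.toList).countP (fun q => q.1 != q.2) ≠ 1))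
instance (pattern : List String) : Decidable (Pre_replacement_candidates pattern) := by
  unfold Pre_replacement_candidates; infer_instance

def pvWitness_replacement_candidates : List String := ["#.#", "###", "..#"]

def Spec_replacement_candidates (pattern : List String) (out : List (Int × List String)) : Prop :=
  out = replacement_candidates_alt pattern
instance (pattern : List String) (out : List (Int × List String)) :
    Decidable (Spec_replacement_candidates pattern out) := by
  unfold Spec_replacement_candidates; infer_instance

-- ===== CLAIM (what is proved, stated in full; the proofs are below) =====
def Claim_equal_replacement_candidates : Prop := ∀ (pattern : List String), Dom_replacement_candidates pattern → Pre_replacement_candidates pattern → Spec_replacement_candidates pattern (replacement_candidates pattern)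

-- ===== LEMMAS AND PROOFS =====

-- the canonical pair list both programs reduce to: lexicographically ordered index
-- pairs i < j whose rows differ in exactly one position
def pvLexPairs (n : Int) : List (Int × Int) :=
  (PySem.List.pyRange 0 n 1).flatMap
    (fun i => (PySem.List.pyRange (i + 1) n 1).map (fun j => (i, j)))

def pvDist1 (s t : List Char) : Bool :=
  ((s.zip t).countP (fun q => q.1 != q.2)) == 1

def pvQual (pattern : List String) : List (Int × Int) :=
  (pvLexPairs (PySem.List.len pattern)).filter
    (fun pr => pvDist1 (PySem.List.pyGetD pattern pr.1 "").toList
                       (PySem.List.pyGetD pattern pr.2 "").toList)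

-- a structural form of the per-bucket pair loop
def pvPairsOf (pattern : List String) : List Int → List (Int × Int)
  | [] => []
  | i :: t =>
    ((t.filter (fun j => PySem.List.pyGetD pattern i "" ≠ PySem.List.pyGetD pattern j "")).map
      (fun j => (i, j))) ++ pvPairsOf pattern t

theorem pvAddCand_eq_modify (d : PySem.Dict Int (PySem.Set String)) (k : Int) (v : String) :
    pvAddCand d k v = d.modify k PySem.Set.empty (fun s => PySem.Set.add s v) := by
  unfold pvAddCand PySem.Dict.modify
  cases h : d.get? k with
  | none =>
    simp [pvTruthy, h, PySem.Dict.getD_eq_get?_getD, PySem.Set.add, PySem.Set.ofList,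
      PySem.Set.empty, PySem.Set.contains]
  | some s =>
    cases s with
    | nil =>
      simp [pvTruthy, h, PySem.Dict.getD_eq_get?_getD, PySem.Set.add, PySem.Set.ofList,
        PySem.Set.empty, PySem.Set.contains]
    | cons a t =>
      simp [pvTruthy, h, PySem.Dict.getD_eq_get?_getD]

theorem pvDiffLoop_spec (ot : String) (l : List Char) :
    ∀ (k : Nat) (acc : Int), 0 ≤ acc → acc ≤ 1 →
    k + l.length ≤ ot.toList.length →
    (pvDiffLoop ot (PySem.List.enumerate l (k : Int)) acc = 1 ↔
      acc + ((l.zip (ot.toList.drop k)).countP (fun q => q.1 != q.2) : Int) = 1) := by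
  induction l with
  | nil =>
    intro k acc h0 h1 hk
    simp [PySem.List.enumerate, pvDiffLoop]
  | cons c rest ih =>
    intro k acc h0 h1 hk
    have hklt : k < ot.toList.length := by simp at hk ⊢; omega
    have hopt : ot.toList[k]? = some ot.toList[k] := List.getElem?_eq_getElem hklt
    rw [PySem.List.enumerate_cons, List.drop_eq_getElem_cons hklt]
    simp only [pvDiffLoop, PySem.Str.pyGet?_natCast, hopt,
      List.zip_cons_cons, List.countP_cons]
    by_cases hne : c = ot.toList[k]
    · have e : (if some c ≠ some ot.toList[k] then acc + 1 else acc) = acc := by simp [hne]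
      rw [e, if_neg (by omega : ¬ acc > 1),
        (by push_cast; ring : (↑k + 1 : Int) = ((k + 1 : Nat) : Int)),
        ih (k + 1) acc h0 h1 (by simp at hk ⊢; omega)]
      simp [hne]
    · have e : (if some c ≠ some ot.toList[k] then acc + 1 else acc) = acc + 1 := by simp [hne]
      have hcbne : (c != ot.toList[k]) = true := by simp [hne]
      rw [e, hcbne, if_pos rfl]
      by_cases hgt : acc + 1 > 1
      · rw [if_pos hgt]
        have hcnt : (0:Int) ≤
            ((List.countP (fun q => q.1 != q.2) (rest.zip (List.drop (k+1) ot.toList))) : Int) := by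
          positivity
        push_cast
        constructor <;> intro h <;> omega
      · rw [if_neg hgt,
          (by push_cast; ring : (↑k + 1 : Int) = ((k + 1 : Nat) : Int)),
          ih (k + 1) (acc + 1) (by omega) (by omega) (by simp at hk ⊢; omega)]
        push_cast
        constructor <;> intro h <;> omega

theorem pvDiffLoop_ge2 (ot : String) (l : List Char) :
    ∀ (k : Nat) (acc : Int), 0 ≤ acc → acc ≤ 1 →
    2 ≤ acc + ((l.zip (ot.toList.drop k)).countP (fun q => q.1 != q.2) : Int) →
    pvDiffLoop ot (PySem.List.enumerate l (k : Int)) acc ≠ 1 := by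
  induction l with
  | nil =>
    intro k acc h0 h1 h2
    simp only [List.zip_nil_left, List.countP_nil, Nat.cast_zero, add_zero] at h2
    omega
  | cons c rest ih =>
    intro k acc h0 h1 h2
    by_cases hklt : k < ot.toList.length
    · have hopt : ot.toList[k]? = some ot.toList[k] := List.getElem?_eq_getElem hklt
      rw [List.drop_eq_getElem_cons hklt] at h2
      simp only [List.zip_cons_cons, List.countP_cons] at h2
      rw [PySem.List.enumerate_cons]
      simp only [pvDiffLoop, PySem.Str.pyGet?_natCast, hopt,
        (by push_cast; ring : ((k : Int) + 1) = ((k + 1 : Nat) : Int))]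
      by_cases hne : c = ot.toList[k]
      · have e : (if some c ≠ some ot.toList[k] then acc + 1 else acc) = acc := by simp [hne]
        rw [e, if_neg (by omega : ¬ acc > 1)]
        refine ih (k + 1) acc h0 h1 ?_
        simp only [hne, bne_self_eq_false, Bool.false_eq_true, if_false, add_zero] at h2
        omega
      · have e : (if some c ≠ some ot.toList[k] then acc + 1 else acc) = acc + 1 := by
          simp [hne]
        rw [e]
        have hbt : (c != ot.toList[k]) = true := by simp [hne]
        rw [hbt] at h2
        simp only [if_true] at h2
        by_cases hgt : acc + 1 > 1
        · rw [if_pos hgt]; omega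
        · rw [if_neg hgt]
          refine ih (k + 1) (acc + 1) (by omega) (by omega) (by push_cast at h2 ⊢; omega)
    · exfalso
      rw [List.drop_eq_nil_of_le (by omega)] at h2
      simp only [List.zip_nil_right, List.countP_nil, Nat.cast_zero, add_zero] at h2
      omega

theorem pv_getD_nat (pattern : List String) {x : Int} {k : Nat}
    (hx : x = (k : Int)) (hk : k < pattern.length) :
    PySem.List.pyGetD pattern x "" = pattern[k] := by
  rw [hx]
  simp [PySem.List.pyGetD_natCast, List.getD_eq_getElem?_getD, List.getElem?_eq_getElem hk]

theorem pvPre_pair (pattern : List String) (hpre : Pre_replacement_candidates pattern)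
    {k1 k2 : Nat} (hk1 : k1 < pattern.length) (hk2 : k2 < pattern.length) (hlt : k1 < k2) :
    pattern[k1].toList.length = pattern[k2].toList.length ∨
    (if pattern[k2].toList.length < pattern[k1].toList.length
     then 2 ≤ (pattern[k1].toList.zip pattern[k2].toList).countP (fun q => q.1 != q.2)
     else (pattern[k1].toList.zip pattern[k2].toList).countP (fun q => q.1 != q.2) ≠ 1) :=
  List.pairwise_iff_getElem.mp hpre k1 k2 hk1 hk2 hlt

theorem pvWhileA_eq_fold (pattern : List String) (i : Int) (cur : String) :
    ∀ (fuel : Nat) (counter : Int) (d : PySem.Dict Int (PySem.Set String)),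
    (PySem.List.len pattern - counter).toNat = fuel →
    pvWhileA pattern i cur counter d =
      (PySem.List.pyRange counter (PySem.List.len pattern) 1).foldl
        (fun d j =>
          if pvDiffLoop (PySem.List.pyGetD pattern j "") (PySem.List.enumerate cur.toList) 0 == 1
          then pvAddCand (pvAddCand d i (PySem.List.pyGetD pattern j "")) j cur else d) d := by
  intro fuel
  induction fuel with
  | zero =>
    intro counter d hf
    have h : ¬ counter < PySem.List.len pattern := by
      simp only [PySem.List.len_eq] at hf ⊢; omega
    rw [pvWhileA, dif_neg h, PySem.List.pyRange_one_eq_nil (by omega)]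
    rfl
  | succ n ihn =>
    intro counter d hf
    by_cases h : counter < PySem.List.len pattern
    · rw [pvWhileA, dif_pos h, PySem.List.pyRange_one_cons h, List.foldl_cons]
      exact ihn (counter + 1) _ (by simp only [PySem.List.len_eq] at hf h ⊢; omega)
    · rw [pvWhileA, dif_neg h, PySem.List.pyRange_one_eq_nil (by omega)]
      rfl

def pvInner (pattern : List String) (i : Int) (cur : String)
    (d : PySem.Dict Int (PySem.Set String)) : PySem.Dict Int (PySem.Set String) :=
  (PySem.List.pyRange (i + 1) (PySem.List.len pattern) 1).foldl
    (fun d j =>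
      if pvDiffLoop (PySem.List.pyGetD pattern j "") (PySem.List.enumerate cur.toList) 0 == 1
      then pvAddCand (pvAddCand d i (PySem.List.pyGetD pattern j "")) j cur else d) d

def pvPairStep (pattern : List String) (d : PySem.Dict Int (PySem.Set String))
    (pr : Int × Int) : PySem.Dict Int (PySem.Set String) :=
  if pvDiffLoop (PySem.List.pyGetD pattern pr.2 "")
      (PySem.List.enumerate (PySem.List.pyGetD pattern pr.1 "").toList) 0 == 1
  then pvAddCand (pvAddCand d pr.1 (PySem.List.pyGetD pattern pr.2 "")) pr.2
        (PySem.List.pyGetD pattern pr.1 "")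
  else d

theorem A_dict_eq_pairStep (pattern : List String) :
    (PySem.List.enumerate pattern).foldl
      (fun d p => pvWhileA pattern p.1 p.2 (p.1 + 1) d) PySem.Dict.empty =
    (pvLexPairs (PySem.List.len pattern)).foldl (pvPairStep pattern) PySem.Dict.empty := by
  rw [PySem.List.enumerate_eq_map_pyRange pattern "", List.foldl_map]
  rw [pvLexPairs, List.foldl_flatMap]
  apply PySem.List.foldl_congr_mem
  intro acc x _
  show pvWhileA pattern x (PySem.List.pyGetD pattern x "") (x + 1) acc = _
  rw [pvWhileA_eq_fold pattern x (PySem.List.pyGetD pattern x "") _ (x + 1) acc rfl,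
    List.foldl_map]
  rfl

theorem A_eq_fold_qual (pattern : List String)
    (hpre : Pre_replacement_candidates pattern) :
    replacement_candidates pattern =
      ((pvQual pattern).foldl (pvStepB pattern) PySem.Dict.empty).items := by
  unfold replacement_candidates
  rw [A_dict_eq_pairStep]
  unfold pvPairStep
  rw [PySem.List.foldl_if_eq_foldl_filter
      (p := fun pr : Int × Int => pvDiffLoop (PySem.List.pyGetD pattern pr.2 "")
        (PySem.List.enumerate (PySem.List.pyGetD pattern pr.1 "").toList) 0 == 1)
      (f := fun d (pr : Int × Int) =>
        pvAddCand (pvAddCand d pr.1 (PySem.List.pyGetD pattern pr.2 "")) pr.2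
          (PySem.List.pyGetD pattern pr.1 ""))]
  rw [List.filter_congr (q := fun pr : Int × Int =>
        pvDist1 (PySem.List.pyGetD pattern pr.1 "").toList
                (PySem.List.pyGetD pattern pr.2 "").toList) ?hcong]
  case hcong =>
    intro pr hpr
    obtain ⟨i, hi, j, hj, hij⟩ : ∃ i, (0 ≤ i ∧ i < (pattern.length : Int)) ∧
        ∃ j, (i < j ∧ j < (pattern.length : Int)) ∧ (i, j) = pr := by
      simpa [pvLexPairs, List.mem_flatMap, List.mem_map, PySem.List.mem_pyRange_one,
        PySem.List.len_eq] using hpr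
    subst hij
    have hk1 : i.toNat < pattern.length := by omega
    have hk2 : j.toNat < pattern.length := by omega
    have hgi : PySem.List.pyGetD pattern i "" = pattern[i.toNat] :=
      pv_getD_nat pattern (by omega) hk1
    have hgj : PySem.List.pyGetD pattern j "" = pattern[j.toNat] :=
      pv_getD_nat pattern (by omega) hk2
    rw [Bool.eq_iff_iff]
    simp only [pvDist1, beq_iff_eq, hgi, hgj]
    by_cases hle : pattern[i.toNat].toList.length ≤ pattern[j.toNat].toList.length
    · have hiff := pvDiffLoop_spec pattern[j.toNat] pattern[i.toNat].toList 0 0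
        (by omega) (by omega) (by simpa using hle)
      simp only [Nat.cast_zero, List.drop_zero, zero_add] at hiff
      rw [hiff]
      omega
    · have hR := pvPre_pair pattern hpre hk1 hk2 (by omega)
      have hcnt2 : 2 ≤ (pattern[i.toNat].toList.zip pattern[j.toNat].toList).countP
          (fun q => q.1 != q.2) := by
        rcases hR with he | hif
        · omega
        · rw [if_pos (by omega)] at hif; exact hif
      have hne1 := pvDiffLoop_ge2 pattern[j.toNat] pattern[i.toNat].toList 0 0
        (by omega) (by omega) (by
          simp only [List.drop_zero]
          omega)
      simp only [Nat.cast_zero] at hne1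
      constructor
      · intro h; exact absurd h hne1
      · intro h; omega
  apply congrArg
  apply PySem.List.foldl_congr_mem
  intro acc pr _
  rw [pvAddCand_eq_modify, pvAddCand_eq_modify]
  rfl

-- ---- B side ----
def pvFlat (pattern : List String) : List ((Int × List Char) × Int) :=
  (PySem.List.enumerate pattern).flatMap
    (fun pr => (PySem.List.pyRange 0 (PySem.Str.len pr.2) 1).map
      (fun p => ((p, pvMask pr.2.toList p), pr.1)))

theorem pvBuckets_eq (pattern : List String) :
    pvBuckets pattern =
      (pvFlat pattern).foldl (fun d q => d.modify q.1 [] (fun x => x ++ [q.2]))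
        PySem.Dict.empty := by
  rw [pvFlat, List.foldl_flatMap]
  unfold pvBuckets
  apply PySem.List.foldl_congr_mem
  intro acc x _
  rw [List.foldl_map]

theorem pvBuckets_getD (pattern : List String) (c : Int × List Char) :
    (pvBuckets pattern).getD c [] =
      ((pvFlat pattern).filter (fun q => q.1 == c)).map (·.2) := by
  rw [pvBuckets_eq, PySem.Dict.getD_foldl_modify_append]
  simp [PySem.Dict.getD_empty]

theorem pvBuckets_keys (pattern : List String) :
    (pvBuckets pattern).keys = PySem.Set.ofList ((pvFlat pattern).map (·.1)) := by
  rw [pvBuckets_eq,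
    PySem.Dict.keys_foldl_modify_key (pvFlat pattern) (·.1) [] (fun _ q => (· ++ [q.2]))]
  rw [PySem.Dict.keys_empty, PySem.Set.update_nil_left]

theorem pvBuckets_keys_nodup (pattern : List String) : (pvBuckets pattern).keys.Nodup := by
  rw [pvBuckets_keys]; exact PySem.Set.nodup_ofList _

theorem pvBuckets_values (pattern : List String) :
    (pvBuckets pattern).values =
      (pvBuckets pattern).keys.map (fun c => (pvBuckets pattern).getD c []) :=
  PySem.Dict.values_eq_map_keys _ (pvBuckets_keys_nodup pattern) []

theorem pvBucketPairs_aux (pattern : List String) (g : List Int) :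
    ∀ (t : List Int) (k : Nat), g.drop k = t → ∀ (acc : List (Int × Int)),
    (PySem.List.enumerate t (k : Int)).foldl
      (fun acc q =>
        (PySem.List.slice g (some (q.1 + 1)) none).foldl
          (fun acc j =>
            if PySem.List.pyGetD pattern q.2 "" ≠ PySem.List.pyGetD pattern j "" then
              acc ++ [(q.2, j)]
            else acc) acc) acc = acc ++ pvPairsOf pattern t := by
  intro t
  induction t with
  | nil => intro k _ acc; simp [PySem.List.enumerate, pvPairsOf]
  | cons i t' ih =>
    intro k hk acc
    have hdrop : g.drop (k + 1) = t' := by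
      rw [← List.tail_drop, hk]; rfl
    rw [PySem.List.enumerate_cons, List.foldl_cons]
    have hslice : PySem.List.slice g (some ((k : Int) + 1)) none = t' := by
      rw [(by push_cast; ring : ((k : Int) + 1) = ((k + 1 : Nat) : Int)),
        PySem.List.slice_from_natCast, hdrop]
    rw [hslice]
    rw [PySem.List.foldl_append_ite
      (p := fun j => PySem.List.pyGetD pattern i "" ≠ PySem.List.pyGetD pattern j "")
      (f := fun j => (i, j))]
    rw [(by push_cast; ring : ((k : Int) + 1) = ((k + 1 : Nat) : Int)),
      ih (k + 1) hdrop]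
    rw [pvPairsOf, List.append_assoc]

theorem pvBucketPairs_eq (pattern : List String) (g : List Int)
    (acc : List (Int × Int)) :
    pvBucketPairs pattern g acc = acc ++ pvPairsOf pattern g := by
  unfold pvBucketPairs
  have := pvBucketPairs_aux pattern g g 0 (by simp) acc
  simpa using this

theorem pvAllPairs_eq (pattern : List String) :
    pvAllPairs pattern = (pvBuckets pattern).values.flatMap (pvPairsOf pattern) := by
  unfold pvAllPairs
  rw [PySem.List.foldl_congr_mem _ _ (fun acc g => acc ++ pvPairsOf pattern g) _
    (fun acc g _ => pvBucketPairs_eq pattern g acc)]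
  rw [PySem.List.foldl_append_eq_flatMap]
  simp

theorem pvMask_eq_eraseIdx (row : List Char) (p : Int) (hp : 0 ≤ p) :
    pvMask row p = row.eraseIdx p.toNat := by
  unfold pvMask
  rw [PySem.List.slice_to row hp, PySem.List.slice_from row (by omega),
    List.eraseIdx_eq_take_drop_succ]
  have : (p + 1).toNat = p.toNat + 1 := by omega
  rw [this]

theorem pvDiffCnt_zero (s : List Char) :
    ∀ (t : List Char), s.length = t.length →
    (((s.zip t).countP (fun q => q.1 != q.2) = 0) ↔ s = t) := by
  induction s with
  | nil => intro t h; cases t <;> simp_all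
  | cons a s' ih =>
    intro t h
    cases t with
    | nil => simp at h
    | cons b t' =>
      simp only [List.zip_cons_cons, List.countP_cons, List.length_cons] at h ⊢
      by_cases hab : a = b
      · subst hab
        simpa using ih t' (by omega)
      · simp [hab]

theorem pv_eraseIdx_diff (s : List Char) :
    ∀ (t : List Char), s.length = t.length →
    (((s.zip t).countP (fun q => q.1 != q.2) = 1) ↔
      (s ≠ t ∧ ∃ p, p < s.length ∧ s.eraseIdx p = t.eraseIdx p)) := by
  induction s with
  | nil => intro t h; cases t <;> simp_all
  | cons a s' ih =>
    intro t h
    cases t with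
    | nil => simp at h
    | cons b t' =>
      simp only [List.zip_cons_cons, List.countP_cons, List.length_cons] at h ⊢
      by_cases hab : a = b
      · subst hab
        simp only [bne_self_eq_false, Bool.false_eq_true, if_false, add_zero]
        rw [ih t' (by omega)]
        constructor
        · rintro ⟨hne, p, hp, he⟩
          refine ⟨by simpa using hne, p + 1, by omega, ?_⟩
          simpa [List.eraseIdx_cons_succ] using he
        · rintro ⟨hne, p, hp, he⟩
          have hne' : s' ≠ t' := by simpa using hne
          refine ⟨hne', ?_⟩
          cases p with
          | zero => simp at he; exact absurd he hne'
          | succ q =>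
            simp only [List.eraseIdx_cons_succ, List.cons.injEq] at he
            exact ⟨q, by omega, he.2⟩
      · have hbt : (a != b) = true := by simp [hab]
        rw [hbt]
        simp only [if_true]
        constructor
        · intro hcnt
          have h0 : (s'.zip t').countP (fun q => q.1 != q.2) = 0 := by omega
          have hst : s' = t' := (pvDiffCnt_zero s' t' (by omega)).mp h0
          subst hst
          exact ⟨by simp [hab], 0, by omega, by simp⟩
        · rintro ⟨hne, p, hp, he⟩
          cases p with
          | zero =>
            simp only [List.eraseIdx_cons_zero] at he
            subst he
            have : (s'.zip s').countP (fun q => q.1 != q.2) = 0 :=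
              (pvDiffCnt_zero s' s' rfl).mpr rfl
            omega
          | succ q =>
            simp only [List.eraseIdx_cons_succ, List.cons.injEq] at he
            exact absurd he.1 hab

theorem pv_eraseIdx_unique (s : List Char) :
    ∀ (t : List Char), s.length = t.length → s ≠ t →
    ∀ p p', p < s.length → p' < s.length →
    s.eraseIdx p = t.eraseIdx p → s.eraseIdx p' = t.eraseIdx p' → p = p' := by
  induction s with
  | nil => intro t h hne; cases t <;> simp_all
  | cons a s' ih =>
    intro t h hne p p' hp hp' he he'
    cases t with
    | nil => simp at h
    | cons b t' =>
      simp only [List.length_cons] at h hp hp'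
      cases p with
      | zero =>
        cases p' with
        | zero => rfl
        | succ q' =>
          simp only [List.eraseIdx_cons_zero] at he
          simp only [List.eraseIdx_cons_succ, List.cons.injEq] at he'
          exact absurd (by rw [he'.1, he]) hne
      | succ q =>
        cases p' with
        | zero =>
          simp only [List.eraseIdx_cons_zero] at he'
          simp only [List.eraseIdx_cons_succ, List.cons.injEq] at he
          exact absurd (by rw [he.1, he']) hne
        | succ q' =>
          simp only [List.eraseIdx_cons_succ, List.cons.injEq] at he he'
          have hab : a = b := he.1
          subst hab
          have hne' : s' ≠ t' := by
            intro hc; exact hne (by rw [hc])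
          have := ih t' (by omega) hne' q q' (by omega) (by omega) he.2 he'.2
          omega

theorem pvFlat_pairwise (pattern : List String) :
    (pvFlat pattern).Pairwise (fun q q' => q.1 = q'.1 → q.2 < q'.2) := by
  unfold pvFlat
  rw [List.pairwise_flatMap]
  constructor
  · intro pr _
    rw [List.pairwise_map]
    apply (PySem.List.pairwise_lt_pyRange_one 0 (PySem.Str.len pr.2)).imp
    intro p p' hpp hkey
    exfalso
    exact absurd (congrArg Prod.fst hkey) (by simpa using ne_of_lt hpp)
  · apply (PySem.List.pairwise_lt_enumerate pattern 0).imp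
    intro a b hab x hx y hy _
    simp only [List.mem_map] at hx hy
    obtain ⟨p, _, rfl⟩ := hx
    obtain ⟨p', _, rfl⟩ := hy
    exact hab

theorem pvBucket_pairwise (pattern : List String) (c : Int × List Char) :
    ((pvBuckets pattern).getD c []).Pairwise (· < ·) := by
  rw [pvBuckets_getD, List.pairwise_map]
  refine List.Pairwise.imp_of_mem ?_ ((pvFlat_pairwise pattern).filter (fun q => q.1 == c))
  intro a b ha hb hR
  rw [List.mem_filter] at ha hb
  exact hR (by rw [beq_iff_eq.mp ha.2, beq_iff_eq.mp hb.2])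

theorem pvBucket_mem (pattern : List String) (c : Int × List Char) (i : Int) :
    i ∈ (pvBuckets pattern).getD c [] ↔
      ∃ (k : Nat) (_ : k < pattern.length), i = (k : Int) ∧ 0 ≤ c.1 ∧
        c.1 < (pattern[k].toList.length : Int) ∧
        c.2 = pvMask pattern[k].toList c.1 := by
  rw [pvBuckets_getD]
  simp only [List.mem_map, List.mem_filter, pvFlat, List.mem_flatMap,
    PySem.List.mem_enumerate_iff, PySem.List.mem_pyRange_one, beq_iff_eq,
    PySem.Str.len_eq, String.length_toList]
  constructor
  · rintro ⟨q, ⟨⟨pr, ⟨k, hk, rfl⟩, p, hp, rfl⟩, rfl⟩, rfl⟩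
    exact ⟨k, hk, by simp, by simpa using hp.1, by simpa using hp.2, rfl⟩
  · rintro ⟨k, hk, rfl, h0, hlt, hc⟩
    refine ⟨((c.1, pvMask pattern[k].toList c.1), (k : Int)),
      ⟨⟨((k : Int), pattern[k]), ⟨k, hk, by simp⟩, c.1, ⟨h0, by simpa using hlt⟩, rfl⟩, ?_⟩, rfl⟩
    rw [← hc]

theorem fst_mem_pvPairsOf (pattern : List String) :
    ∀ (g : List Int) (x : Int × Int), x ∈ pvPairsOf pattern g → x.1 ∈ g := by
  intro g
  induction g with
  | nil => simp [pvPairsOf]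
  | cons i t ih =>
    intro x hx
    rcases List.mem_append.mp hx with h | h
    · obtain ⟨j, _, rfl⟩ := List.mem_map.mp h
      exact List.mem_cons_self
    · exact List.mem_cons_of_mem _ (ih x h)

theorem mem_pvPairsOf (pattern : List String) :
    ∀ (g : List Int), g.Pairwise (· < ·) → ∀ (x : Int × Int),
    (x ∈ pvPairsOf pattern g ↔ x.1 ∈ g ∧ x.2 ∈ g ∧ x.1 < x.2 ∧
      PySem.List.pyGetD pattern x.1 "" ≠ PySem.List.pyGetD pattern x.2 "") := by
  intro g
  induction g with
  | nil => simp [pvPairsOf]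
  | cons i t ih =>
    intro hpw x
    rw [List.pairwise_cons] at hpw
    constructor
    · intro hx
      rcases List.mem_append.mp hx with h | h
      · obtain ⟨j, hj, rfl⟩ := List.mem_map.mp h
        rw [List.mem_filter] at hj
        refine ⟨List.mem_cons_self, List.mem_cons_of_mem _ hj.1,
          hpw.1 j hj.1, by simpa using hj.2⟩
      · obtain ⟨h1, h2, h3, h4⟩ := (ih hpw.2 x).mp h
        exact ⟨List.mem_cons_of_mem _ h1, List.mem_cons_of_mem _ h2, h3, h4⟩
    · rintro ⟨h1, h2, h3, h4⟩
      rcases List.mem_cons.mp h1 with rfl | h1'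
      · have h2' : x.2 ∈ t := by
          rcases List.mem_cons.mp h2 with he | ht
          · exfalso; omega
          · exact ht
        apply List.mem_append_left
        rw [List.mem_map]
        exact ⟨x.2, List.mem_filter.mpr ⟨h2', by simpa using h4⟩, rfl⟩
      · have hi1 : i < x.1 := hpw.1 _ h1'
        have h2' : x.2 ∈ t := by
          rcases List.mem_cons.mp h2 with he | ht
          · exfalso; omega
          · exact ht
        exact List.mem_append_right _ ((ih hpw.2 x).mpr ⟨h1', h2', h3, h4⟩)

theorem nodup_pvPairsOf (pattern : List String) :
    ∀ (g : List Int), g.Pairwise (· < ·) → (pvPairsOf pattern g).Nodup := by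
  intro g
  induction g with
  | nil => simp [pvPairsOf]
  | cons i t ih =>
    intro hpw
    rw [List.pairwise_cons] at hpw
    rw [pvPairsOf, List.nodup_append]
    refine ⟨?_, ih hpw.2, ?_⟩
    · apply List.Nodup.map
      · intro a b hab; injection hab
      · exact List.Nodup.filter _ (hpw.2.imp (fun h => ne_of_lt h))
    · intro x hx y hy
      have h1 := fst_mem_pvPairsOf pattern t y hy
      obtain ⟨j, hj, rfl⟩ := List.mem_map.mp hx
      intro he
      rw [← he] at h1
      exact (ne_of_gt (hpw.1 _ h1)) rfl

theorem pvLexPairs_pairwise (n : Int) :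
    (pvLexPairs n).Pairwise (fun a b => (toLex a : Lex (Int × Int)) < toLex b) := by
  unfold pvLexPairs
  rw [List.pairwise_flatMap]
  constructor
  · intro i _
    rw [List.pairwise_map]
    apply (PySem.List.pairwise_lt_pyRange_one (i + 1) n).imp
    intro a b hab
    rw [Prod.Lex.lt_iff]
    exact Or.inr ⟨rfl, hab⟩
  · apply (PySem.List.pairwise_lt_pyRange_one 0 n).imp
    intro a b hab x hx y hy
    obtain ⟨p, _, rfl⟩ := List.mem_map.mp hx
    obtain ⟨p', _, rfl⟩ := List.mem_map.mp hy
    rw [Prod.Lex.lt_iff]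
    exact Or.inl hab

theorem pvQual_pairwise (pattern : List String) :
    (pvQual pattern).Pairwise (fun a b => (toLex a : Lex (Int × Int)) < toLex b) :=
  (pvLexPairs_pairwise _).filter _

theorem pvQual_nodup (pattern : List String) : (pvQual pattern).Nodup :=
  (pvQual_pairwise pattern).imp (fun h => by
    intro he; rw [he] at h; exact lt_irrefl _ h)

theorem mem_pvQual (pattern : List String) (x : Int × Int) :
    x ∈ pvQual pattern ↔ (0 ≤ x.1 ∧ x.1 < x.2 ∧ x.2 < (pattern.length : Int)) ∧
      pvDist1 (PySem.List.pyGetD pattern x.1 "").toList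
        (PySem.List.pyGetD pattern x.2 "").toList = true := by
  unfold pvQual pvLexPairs
  rw [List.mem_filter]
  simp only [List.mem_flatMap, List.mem_map, PySem.List.mem_pyRange_one, PySem.List.len_eq]
  constructor
  · rintro ⟨⟨i, hi, j, hj, rfl⟩, hd⟩
    exact ⟨⟨hi.1, by omega, hj.2⟩, hd⟩
  · rintro ⟨⟨h0, hlt, hn⟩, hd⟩
    exact ⟨⟨x.1, ⟨h0, by omega⟩, x.2, ⟨by omega, hn⟩, rfl⟩, hd⟩

theorem pairsRaw_mem (pattern : List String) (hpre : Pre_replacement_candidates pattern)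
    (x : Int × Int) :
    (x ∈ (pvBuckets pattern).values.flatMap (pvPairsOf pattern)) ↔ x ∈ pvQual pattern := by
  rw [List.mem_flatMap, mem_pvQual]
  constructor
  · rintro ⟨g, hg, hx⟩
    rw [pvBuckets_values, List.mem_map] at hg
    obtain ⟨c, hc, rfl⟩ := hg
    obtain ⟨h1, h2, hlt, hne⟩ :=
      (mem_pvPairsOf pattern _ (pvBucket_pairwise pattern c) x).mp hx
    rw [pvBucket_mem] at h1 h2
    obtain ⟨k1, hk1, hx1, hc0, hclt1, hmask1⟩ := h1
    obtain ⟨k2, hk2, hx2, _, hclt2, hmask2⟩ := h2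
    have hget1 := pv_getD_nat pattern hx1 hk1
    have hget2 := pv_getD_nat pattern hx2 hk2
    have hstr : pattern[k1] ≠ pattern[k2] := by rw [hget1, hget2] at hne; exact hne
    have hlist : pattern[k1].toList ≠ pattern[k2].toList :=
      fun h => hstr (String.toList_inj.mp h)
    have herase : pattern[k1].toList.eraseIdx c.1.toNat =
        pattern[k2].toList.eraseIdx c.1.toNat := by
      rw [← pvMask_eq_eraseIdx _ _ hc0, ← pvMask_eq_eraseIdx _ _ hc0, ← hmask1, ← hmask2]
    have hlensEq : pattern[k1].toList.length = pattern[k2].toList.length := by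
      have hlen := congrArg List.length herase
      rw [List.length_eraseIdx, List.length_eraseIdx] at hlen
      simp only [if_pos (by omega : c.1.toNat < pattern[k1].toList.length),
        if_pos (by omega : c.1.toNat < pattern[k2].toList.length)] at hlen
      omega
    have hcnt := (pv_eraseIdx_diff _ _ hlensEq).mpr ⟨hlist, c.1.toNat, by omega, herase⟩
    refine ⟨⟨by rw [hx1]; positivity, hlt, by rw [hx2]; exact_mod_cast hk2⟩, ?_⟩
    rw [pvDist1, hget1, hget2]
    simpa using hcnt
  · rintro ⟨⟨h0, hlt, hn⟩, hd⟩
    have hk1 : x.1.toNat < pattern.length := by omega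
    have hk2 : x.2.toNat < pattern.length := by omega
    have hx1 : x.1 = (x.1.toNat : Int) := by omega
    have hx2 : x.2 = (x.2.toNat : Int) := by omega
    have hget1 := pv_getD_nat pattern hx1 hk1
    have hget2 := pv_getD_nat pattern hx2 hk2
    rw [pvDist1, hget1, hget2] at hd
    have hd' : (pattern[x.1.toNat].toList.zip pattern[x.2.toNat].toList).countP
        (fun q => q.1 != q.2) = 1 := by simpa using hd
    have hR := pvPre_pair pattern hpre hk1 hk2 (by omega)
    have hlensEq : pattern[x.1.toNat].toList.length = pattern[x.2.toNat].toList.length := by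
      rcases hR with he | hif
      · exact he
      · exfalso; split_ifs at hif <;> omega
    obtain ⟨hneL, p, hp, herase⟩ := (pv_eraseIdx_diff _ _ hlensEq).mp hd'
    have hmaskp : pvMask pattern[x.1.toNat].toList (p : Int) =
        pattern[x.1.toNat].toList.eraseIdx p := by
      rw [pvMask_eq_eraseIdx _ _ (by positivity), Int.toNat_natCast]
    have hmaskp2 : pvMask pattern[x.2.toNat].toList (p : Int) =
        pattern[x.2.toNat].toList.eraseIdx p := by
      rw [pvMask_eq_eraseIdx _ _ (by positivity), Int.toNat_natCast]
    refine ⟨(pvBuckets pattern).getD ((p : Int), pattern[x.1.toNat].toList.eraseIdx p) [],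
      ?_, ?_⟩
    · rw [pvBuckets_values, List.mem_map]
      refine ⟨((p : Int), pattern[x.1.toNat].toList.eraseIdx p), ?_, rfl⟩
      rw [pvBuckets_keys, PySem.Set.mem_ofList, List.mem_map]
      refine ⟨(((p : Int), pvMask pattern[x.1.toNat].toList (p : Int)), x.1), ?_, ?_⟩
      · unfold pvFlat
        rw [List.mem_flatMap]
        refine ⟨(x.1, pattern[x.1.toNat]), ?_, ?_⟩
        · rw [PySem.List.mem_enumerate_iff]
          exact ⟨x.1.toNat, hk1, by rw [← hx1]; simp⟩
        · rw [List.mem_map]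
          exact ⟨(p : Int), by
            rw [PySem.List.mem_pyRange_one, PySem.Str.len_eq]
            exact ⟨by positivity, by exact_mod_cast hp⟩, rfl⟩
      · rw [hmaskp]
    · refine (mem_pvPairsOf _ _ (pvBucket_pairwise _ _) x).mpr
        ⟨?_, ?_, hlt, by rw [hget1, hget2]; exact fun h => hneL (by rw [h])⟩
      · rw [pvBucket_mem]
        refine ⟨x.1.toNat, hk1, hx1, by positivity, by simpa using hp, by
          simp only []
          rw [hmaskp]⟩
      · rw [pvBucket_mem]
        have hp2 : p < pattern[x.2.toNat].toList.length := by rw [← hlensEq]; exact hp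
        refine ⟨x.2.toNat, hk2, hx2, by positivity, by
          show ((p : Int)) < _
          exact_mod_cast hp2, by
          show _ = pvMask _ _
          rw [hmaskp2, ← herase]⟩

theorem pairsRaw_nodup (pattern : List String) :
    ((pvBuckets pattern).values.flatMap (pvPairsOf pattern)).Nodup := by
  rw [List.nodup_flatMap]
  constructor
  · intro g hg
    rw [pvBuckets_values, List.mem_map] at hg
    obtain ⟨c, _, rfl⟩ := hg
    exact nodup_pvPairsOf pattern _ (pvBucket_pairwise pattern c)
  · rw [pvBuckets_values, List.pairwise_map]
    apply (pvBuckets_keys_nodup pattern).imp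
    intro c c' hcc x hx hx'
    obtain ⟨h1, h2, hlt, hne⟩ :=
      (mem_pvPairsOf pattern _ (pvBucket_pairwise pattern c) x).mp hx
    obtain ⟨h1', h2', _, _⟩ :=
      (mem_pvPairsOf pattern _ (pvBucket_pairwise pattern c') x).mp hx'
    rw [pvBucket_mem] at h1 h2 h1' h2'
    obtain ⟨k1, hk1, hx1, hc0, hclt1, hmask1⟩ := h1
    obtain ⟨k2, hk2, hx2, _, hclt2, hmask2⟩ := h2
    obtain ⟨k1', hk1', hx1', hc0', hclt1', hmask1'⟩ := h1'
    obtain ⟨k2', hk2', hx2', _, hclt2', hmask2'⟩ := h2'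
    have hk1eq : k1' = k1 := by omega
    have hk2eq : k2' = k2 := by omega
    simp only [hk1eq] at hclt1' hmask1'
    simp only [hk2eq] at hclt2' hmask2'
    have hget1 := pv_getD_nat pattern hx1 hk1
    have hget2 := pv_getD_nat pattern hx2 hk2
    have hstr : pattern[k1] ≠ pattern[k2] := by rw [hget1, hget2] at hne; exact hne
    have hlist : pattern[k1].toList ≠ pattern[k2].toList :=
      fun h => hstr (String.toList_inj.mp h)
    have herase : pattern[k1].toList.eraseIdx c.1.toNat =
        pattern[k2].toList.eraseIdx c.1.toNat := by
      rw [← pvMask_eq_eraseIdx _ _ hc0, ← pvMask_eq_eraseIdx _ _ hc0, ← hmask1, ← hmask2]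
    have hlensEq : pattern[k1].toList.length = pattern[k2].toList.length := by
      have hlen := congrArg List.length herase
      rw [List.length_eraseIdx, List.length_eraseIdx] at hlen
      simp only [if_pos (by omega : c.1.toNat < pattern[k1].toList.length),
        if_pos (by omega : c.1.toNat < pattern[k2].toList.length)] at hlen
      omega
    have herase' : pattern[k1].toList.eraseIdx c'.1.toNat =
        pattern[k2].toList.eraseIdx c'.1.toNat := by
      rw [← pvMask_eq_eraseIdx _ _ hc0', ← pvMask_eq_eraseIdx _ _ hc0', ← hmask1', ← hmask2']
    have hpz := pv_eraseIdx_unique _ _ hlensEq hlist c.1.toNat c'.1.toNat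
      (by omega) (by omega) herase herase'
    apply hcc
    have hfst : c.1 = c'.1 := by omega
    have hsnd : c.2 = c'.2 := by
      rw [hmask1, hmask1', hfst]
    exact Prod.ext hfst hsnd

theorem sorted_pairs_eq (pattern : List String) (hpre : Pre_replacement_candidates pattern) :
    PySem.List.sorted (pvAllPairs pattern) (fun pr => (toLex pr : Lex (Int × Int))) =
      pvQual pattern := by
  apply PySem.List.sorted_eq_of_perm_of_pairwise_lt
  · rw [pvAllPairs_eq]
    exact (List.perm_ext_iff_of_nodup (pvQual_nodup pattern)
      (pairsRaw_nodup pattern)).mpr (fun a => (pairsRaw_mem pattern hpre a).symm)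
  · exact pvQual_pairwise pattern

theorem B_eq_fold_qual (pattern : List String)
    (hpre : Pre_replacement_candidates pattern) :
    replacement_candidates_alt pattern =
      ((pvQual pattern).foldl (pvStepB pattern) PySem.Dict.empty).items := by
  unfold replacement_candidates_alt
  rw [sorted_pairs_eq pattern hpre]

-- ===== VERDICT (by name: the statement is the Claim_ definition above) =====
theorem replacement_candidates_spec : Claim_equal_replacement_candidates := by
  intro pattern _ hpre
  unfold Spec_replacement_candidates
  rw [A_eq_fold_qual pattern hpre, B_eq_fold_qual pattern hpre]
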